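-- pv_equiv track=rewrite | github.com/Nicolas-Loisy/POC_GLaDOS | glados/tools/ir_osram/ir_osram_adapter.py | nec_encode
-- ===== SOURCE A (Python) =====
-- def nec_encode(address: int, command: int) -> list:
--     """Encode une commande au format NEC"""
--     data = []
--
--     # AGC burst: 9ms ON, 4.5ms OFF
--     data.extend([9000, 4500])
--
--     # Address (8 bits, LSB first)
--     for i in range(8):
--         if (address >> i) & 1:
--             data.extend([560, 1690])  # Bit 1
--         else:
--             data.extend([560, 560])   # Bit 0
--
--     # ~Address (8 bits, LSB first)
--     address_inv = (~address) & 0xFF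
--     for i in range(8):
--         if (address_inv >> i) & 1:
--             data.extend([560, 1690])  # Bit 1
--         else:
--             data.extend([560, 560])   # Bit 0
--
--     # Command (8 bits, LSB first)
--     for i in range(8):
--         if (command >> i) & 1:
--             data.extend([560, 1690])  # Bit 1
--         else:
--             data.extend([560, 560])   # Bit 0
--
--     # ~Command (8 bits, LSB first)
--     command_inv = (~command) & 0xFF
--     for i in range(8):
--         if (command_inv >> i) & 1:
--             data.extend([560, 1690])  # Bit 1
--         else:
--             data.extend([560, 560])   # Bit 0
--
--     # Stop bit
--     data.append(560)
--
--     # Compléter à 71 impulsions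
--     while len(data) < 71:
--         data.append(560)
--
--     return data
-- ===== SOURCE B (Python) =====
-- def _bits(v, n):
--     """Pulse pairs for the n low bits of v (LSB first), then stop bit + padding to 71 pulses."""
--     if n == 0:
--         return [560, 560, 560, 560, 560]
--     v, bit = divmod(v, 2)
--     return [560, 560 + 1130 * bit] + _bits(v, n - 1)
--
-- def nec_encode(address: int, command: int) -> list:
--     """Encode une commande au format NEC"""
--     v = (address & 0xFF) + ((~address & 0xFF) << 8) + ((command & 0xFF) << 16) + ((~command & 0xFF) << 24)
--     return [9000, 4500] + _bits(v, 32)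
-- ===== Notes on version B (the rewrite author's own statement) =====
-- stated objective: simpler
-- what changed: B packs the four NEC bytes into one 32-bit value and emits the pulse list by a structural recursion that consumes the value with divmod(v,2), computing each gap arithmetically as 560+1130*bit and ending in a constant 5-pulse tail, replacing A's four index-based 8-bit loops with branches plus a pad-to-71 while-loop.
import Mathlib
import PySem

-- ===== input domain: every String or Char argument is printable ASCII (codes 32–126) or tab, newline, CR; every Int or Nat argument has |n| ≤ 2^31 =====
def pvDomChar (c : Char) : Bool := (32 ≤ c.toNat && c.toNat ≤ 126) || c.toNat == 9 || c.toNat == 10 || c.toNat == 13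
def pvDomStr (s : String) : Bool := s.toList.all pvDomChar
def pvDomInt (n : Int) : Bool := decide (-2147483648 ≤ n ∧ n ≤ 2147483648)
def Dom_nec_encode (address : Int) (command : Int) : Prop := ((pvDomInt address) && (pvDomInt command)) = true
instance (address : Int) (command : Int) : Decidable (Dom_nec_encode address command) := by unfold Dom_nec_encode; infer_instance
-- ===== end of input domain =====

-- B packs the four NEC bytes into one 32-bit value and emits the pulse list by a divmod-consuming
-- structural recursion with an arithmetic gap formula and a constant tail, replacing A's four
-- index-based bit loops with branches plus a pad-to-71 while-loop (objective: simpler).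

-- ===== PORT A =====
-- `while len(data) < 71: data.append(560)`, transliterated
def necPad (d : List Int) : List Int :=
  if h : d.length < 71 then necPad (d ++ [560]) else d
  termination_by 71 - d.length
  decreasing_by simp; omega

def nec_encode (address : Int) (command : Int) : List Int :=
  let data : List Int := []
  -- AGC burst
  let data := data ++ [9000, 4500]
  -- Address (8 bits, LSB first); `(x >> i) & 1` ported as PySem.Int.band (x >>> i) 1
  -- (exact: >>> on Int is Python's arithmetic shift for the nonnegative i used here)
  let data := (PySem.List.pyRange 0 8 1).foldl (fun d i =>
    if PySem.Int.band (address >>> i) 1 ≠ 0 then d ++ [560, 1690] else d ++ [560, 560]) data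
  -- ~Address (8 bits, LSB first); `~x` is Int.not, `& 0xFF` is PySem.Int.band · 255 (exact)
  let address_inv := PySem.Int.band (Int.not address) 255
  let data := (PySem.List.pyRange 0 8 1).foldl (fun d i =>
    if PySem.Int.band (address_inv >>> i) 1 ≠ 0 then d ++ [560, 1690] else d ++ [560, 560]) data
  -- Command (8 bits, LSB first)
  let data := (PySem.List.pyRange 0 8 1).foldl (fun d i =>
    if PySem.Int.band (command >>> i) 1 ≠ 0 then d ++ [560, 1690] else d ++ [560, 560]) data
  -- ~Command (8 bits, LSB first)
  let command_inv := PySem.Int.band (Int.not command) 255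
  let data := (PySem.List.pyRange 0 8 1).foldl (fun d i =>
    if PySem.Int.band (command_inv >>> i) 1 ≠ 0 then d ++ [560, 1690] else d ++ [560, 560]) data
  -- Stop bit, then pad to 71 pulses
  let data := data ++ [560]
  necPad data

-- ===== PORT B =====
-- Source B's `_bits(v, n)`: structural recursion on n; `v, bit = divmod(v, 2)` ported with
-- PySem.Int.floordiv / PySem.Int.mod (exact for the constant divisor 2)
def necBitsAlt (v : Int) (n : Nat) : List Int :=
  match n with
  | 0 => [560, 560, 560, 560, 560]
  | m + 1 =>
    let q := PySem.Int.floordiv v 2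
    let bit := PySem.Int.mod v 2
    [560, 560 + 1130 * bit] ++ necBitsAlt q m

def nec_encode_alt (address : Int) (command : Int) : List Int :=
  -- the four bytes occupy disjoint ranges, so Source B adds them; `& 0xFF` is PySem.Int.band · 255,
  -- `~x` is Int.not, `<<` on these nonnegative values is Int's <<< (exact)
  let v := PySem.Int.band address 255 + (PySem.Int.band (Int.not address) 255) <<< 8
    + (PySem.Int.band command 255) <<< 16 + (PySem.Int.band (Int.not command) 255) <<< 24
  [9000, 4500] ++ necBitsAlt v 32

-- ===== PRECONDITION & SPEC =====
def Spec_nec_encode (address : Int) (command : Int) (out : List Int) : Prop := out = nec_encode_alt address command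
instance (address : Int) (command : Int) (out : List Int) : Decidable (Spec_nec_encode address command out) := by unfold Spec_nec_encode; infer_instance

-- ===== CLAIM (what is proved, stated in full; the proofs are below) =====
def Claim_equal_nec_encode : Prop := ∀ (address : Int) (command : Int), Dom_nec_encode address command → Spec_nec_encode address command (nec_encode address command)

-- ===== LEMMAS AND PROOFS =====

-- the pulse pairs for the n low bits of x, LSB first
def necPulses (x : Int) (n : Nat) : List Int :=
  (List.range n).flatMap (fun j => if (x / 2 ^ j) % 2 = 1 then [560, 1690] else [560, 560])

lemma bitCondI (x : Int) (n : Nat) : (PySem.Int.band (x >>> (n : Int)) 1 ≠ 0) ↔ (x / 2 ^ n % 2 = 1) := by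
  rw [Int.shiftRight_natCast_right, Int.shiftRight_eq_div_pow, PySem.Int.band_one,
    PySem.Int.mod_eq_emod_of_pos (by norm_num)]
  push_cast
  generalize x / 2 ^ n = y
  omega

lemma append_ite (d e f : List Int) (c : Prop) [Decidable c] :
    (if c then d ++ e else d ++ f) = d ++ (if c then e else f) := by split <;> rfl

lemma mask255 (x : Int) : PySem.Int.band x 255 = x % 256 := by
  unfold PySem.Int.band
  by_cases hx : 0 ≤ x
  · rw [if_pos hx, if_pos (by norm_num)]
    have h2 : x.toNat &&& (255:Int).toNat = x.toNat % 256 := by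
      simpa using Nat.and_two_pow_sub_one_eq_mod x.toNat 8
    rw [h2]; omega
  · rw [if_neg hx, if_pos (by norm_num)]
    have h2 : (255:Int).toNat &&& (-x - 1).toNat = (-x - 1).toNat % 256 := by
      rw [Nat.and_comm]; simpa using Nat.and_two_pow_sub_one_eq_mod (-x - 1).toNat 8
    rw [h2]; omega

lemma int_not_eq (x : Int) : Int.not x = -x - 1 := by
  cases x with
  | ofNat n => simp [Int.not, Int.negSucc_eq]; omega
  | negSucc n => simp [Int.not, Int.negSucc_eq]

lemma fold8 (x : Int) (d : List Int) :
    (PySem.List.pyRange 0 8 1).foldl (fun d i =>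
      if PySem.Int.band (x >>> i) 1 ≠ 0 then d ++ [560, 1690] else d ++ [560, 560]) d
    = d ++ necPulses x 8 := by
  simp only [append_ite]
  rw [PySem.List.foldl_append_eq_flatMap,
    show PySem.List.pyRange 0 8 1 = [0, 1, 2, 3, 4, 5, 6, 7] from by decide]
  have h0 := bitCondI x 0; have h1 := bitCondI x 1; have h2 := bitCondI x 2; have h3 := bitCondI x 3; have h4 := bitCondI x 4; have h5 := bitCondI x 5; have h6 := bitCondI x 6; have h7 := bitCondI x 7;
  push_cast at h0 h1 h2 h3 h4 h5 h6 h7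
  simp only [necPulses, show List.range 8 = [0, 1, 2, 3, 4, 5, 6, 7] from by decide,
    List.flatMap_cons, List.flatMap_nil, List.append_nil, h0, h1, h2, h3, h4, h5, h6, h7]
  norm_num

lemma necPulses_len (x : Int) (n : Nat) : (necPulses x n).length = 2 * n := by
  induction n with
  | zero => simp [necPulses]
  | succ n ih => simp [necPulses, List.range_succ, apply_ite List.length] at ih ⊢; omega

lemma pad67 (d : List Int) (h : d.length = 67) : necPad d = d ++ [560, 560, 560, 560] := by
  rw [necPad, dif_pos (by simp [h]), necPad, dif_pos (by simp [h]), necPad,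
    dif_pos (by simp [h]), necPad, dif_pos (by simp [h]), necPad, dif_neg (by simp [h])]
  simp

lemma shiftL_lit (y : Int) (n : Nat) : y <<< (n : Int) = y * 2 ^ n := by
  rw [Int.shiftLeft_natCast_right, Int.shiftLeft_eq]

lemma pulses_step (x : Int) (n : Nat) :
    necPulses x (8 + n) = necPulses x 8 ++ necPulses (x / 256) n := by
  have hx : ∀ j : Nat, x / 2 ^ (8 + j) = x / 256 / 2 ^ j := by
    intro j
    have h256 : (256 : Int) * 2 ^ j = 2 ^ (8 + j) := by rw [pow_add]; norm_num
    rw [Int.ediv_ediv_of_nonneg (by norm_num), h256]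
  unfold necPulses
  rw [List.range_add, List.flatMap_append, List.flatMap_map]
  simp only [hx]

lemma pulses_step1 (x : Int) (n : Nat) :
    necPulses x (1 + n) = necPulses x 1 ++ necPulses (x / 2) n := by
  have hx : ∀ j : Nat, x / 2 ^ (1 + j) = x / 2 / 2 ^ j := by
    intro j
    have h2 : (2 : Int) * 2 ^ j = 2 ^ (1 + j) := by rw [pow_add]; ring
    rw [Int.ediv_ediv_of_nonneg (by norm_num), h2]
  unfold necPulses
  rw [List.range_add, List.flatMap_append, List.flatMap_map]
  simp only [hx]

lemma pulses_one (x : Int) : necPulses x 1 = [560, 560 + 1130 * (x % 2)] := by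
  unfold necPulses
  simp only [show List.range 1 = [0] from by decide, List.flatMap_cons, List.flatMap_nil,
    List.append_nil, pow_zero, Int.ediv_one]
  have : x % 2 = 0 ∨ x % 2 = 1 := by omega
  rcases this with h | h <;> simp [h]

lemma necBitsAlt_eq (n : Nat) : ∀ v : Int,
    necBitsAlt v n = necPulses v n ++ [560, 560, 560, 560, 560] := by
  induction n with
  | zero => intro v; simp [necBitsAlt, necPulses]
  | succ m ih =>
    intro v
    show [560, 560 + 1130 * PySem.Int.mod v 2] ++ necBitsAlt (PySem.Int.floordiv v 2) m = _
    rw [PySem.Int.mod_eq_emod_of_pos (by norm_num), PySem.Int.floordiv_eq_ediv_of_pos (by norm_num),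
      ih, show m + 1 = 1 + m from by omega, pulses_step1, pulses_one]
    simp

lemma pulses_low (x B : Int) : necPulses (x % 256 + 256 * B) 8 = necPulses x 8 := by
  have h0 : (x % 256 + 256 * B) / 2 ^ 0 % 2 = 1 ↔ x / 2 ^ 0 % 2 = 1 := by norm_num; omega
  have h1 : (x % 256 + 256 * B) / 2 ^ 1 % 2 = 1 ↔ x / 2 ^ 1 % 2 = 1 := by norm_num; omega
  have h2 : (x % 256 + 256 * B) / 2 ^ 2 % 2 = 1 ↔ x / 2 ^ 2 % 2 = 1 := by norm_num; omega
  have h3 : (x % 256 + 256 * B) / 2 ^ 3 % 2 = 1 ↔ x / 2 ^ 3 % 2 = 1 := by norm_num; omega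
  have h4 : (x % 256 + 256 * B) / 2 ^ 4 % 2 = 1 ↔ x / 2 ^ 4 % 2 = 1 := by norm_num; omega
  have h5 : (x % 256 + 256 * B) / 2 ^ 5 % 2 = 1 ↔ x / 2 ^ 5 % 2 = 1 := by norm_num; omega
  have h6 : (x % 256 + 256 * B) / 2 ^ 6 % 2 = 1 ↔ x / 2 ^ 6 % 2 = 1 := by norm_num; omega
  have h7 : (x % 256 + 256 * B) / 2 ^ 7 % 2 = 1 ↔ x / 2 ^ 7 % 2 = 1 := by norm_num; omega
  unfold necPulses
  simp only [show List.range 8 = [0, 1, 2, 3, 4, 5, 6, 7] from by decide,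
    List.flatMap_cons, List.flatMap_nil, List.append_nil, h0, h1, h2, h3, h4, h5, h6, h7]

lemma pulses_low' (m B : Int) :
    necPulses (m + 256 * B) 8 = necPulses m 8 := by
  have h0 : (m + 256 * B) / 2 ^ 0 % 2 = 1 ↔ m / 2 ^ 0 % 2 = 1 := by norm_num; omega
  have h1 : (m + 256 * B) / 2 ^ 1 % 2 = 1 ↔ m / 2 ^ 1 % 2 = 1 := by norm_num; omega
  have h2 : (m + 256 * B) / 2 ^ 2 % 2 = 1 ↔ m / 2 ^ 2 % 2 = 1 := by norm_num; omega
  have h3 : (m + 256 * B) / 2 ^ 3 % 2 = 1 ↔ m / 2 ^ 3 % 2 = 1 := by norm_num; omega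
  have h4 : (m + 256 * B) / 2 ^ 4 % 2 = 1 ↔ m / 2 ^ 4 % 2 = 1 := by norm_num; omega
  have h5 : (m + 256 * B) / 2 ^ 5 % 2 = 1 ↔ m / 2 ^ 5 % 2 = 1 := by norm_num; omega
  have h6 : (m + 256 * B) / 2 ^ 6 % 2 = 1 ↔ m / 2 ^ 6 % 2 = 1 := by norm_num; omega
  have h7 : (m + 256 * B) / 2 ^ 7 % 2 = 1 ↔ m / 2 ^ 7 % 2 = 1 := by norm_num; omega
  unfold necPulses
  simp only [show List.range 8 = [0, 1, 2, 3, 4, 5, 6, 7] from by decide,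
    List.flatMap_cons, List.flatMap_nil, List.append_nil, h0, h1, h2, h3, h4, h5, h6, h7]

lemma pulses_split (a c : Int) :
    necPulses (a % 256 + (-a - 1) % 256 * 2 ^ 8 + c % 256 * 2 ^ 16 + (-c - 1) % 256 * 2 ^ 24) 32
    = necPulses a 8 ++ (necPulses ((-a - 1) % 256) 8 ++ (necPulses c 8 ++ necPulses ((-c - 1) % 256) 8)) := by
  have hV : a % 256 + (-a - 1) % 256 * 2 ^ 8 + c % 256 * 2 ^ 16 + (-c - 1) % 256 * 2 ^ 24
      = a % 256 + 256 * ((-a - 1) % 256 + 256 * (c % 256 + 256 * ((-c - 1) % 256))) := by ring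
  have d1 : (a % 256 + 256 * ((-a - 1) % 256 + 256 * (c % 256 + 256 * ((-c - 1) % 256)))) / 256
      = (-a - 1) % 256 + 256 * (c % 256 + 256 * ((-c - 1) % 256)) := by omega
  have d2 : ((-a - 1) % 256 + 256 * (c % 256 + 256 * ((-c - 1) % 256))) / 256
      = c % 256 + 256 * ((-c - 1) % 256) := by omega
  have d3 : (c % 256 + 256 * ((-c - 1) % 256)) / 256 = (-c - 1) % 256 := by omega
  rw [hV, show (32 : Nat) = 8 + 24 from rfl, pulses_step, pulses_low, d1,
    show (24 : Nat) = 8 + 16 from rfl, pulses_step,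
    pulses_low', d2,
    show (16 : Nat) = 8 + 8 from rfl, pulses_step, pulses_low, d3]

-- ===== VERDICT (by name: the statement is the Claim_ definition above) =====
theorem nec_encode_spec : Claim_equal_nec_encode := by
  intro address command _
  show nec_encode address command = nec_encode_alt address command
  unfold nec_encode nec_encode_alt
  have s8 : ∀ y : Int, y <<< (8 : Int) = y * 2 ^ 8 := fun y => shiftL_lit y 8
  have s16 : ∀ y : Int, y <<< (16 : Int) = y * 2 ^ 16 := fun y => shiftL_lit y 16
  have s24 : ∀ y : Int, y <<< (24 : Int) = y * 2 ^ 24 := fun y => shiftL_lit y 24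
  simp only [mask255, int_not_eq, s8, s16, s24, fold8, necBitsAlt_eq, List.nil_append]
  rw [pulses_split, pad67 _ (by simp [necPulses_len])]
  simp [List.append_assoc]
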